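-- pv_equiv track=rewrite | github.com/garystrain01/TransientML | TransClassifier.py | GenerateListOfPairsToTest
-- ===== SOURCE A (Python) =====
-- def GenerateListOfPairsToTest(listofClasses):
--     import itertools
--     import operator
--
--     processDict = {}
--     modelNumber = 0
--
--     if (len(listofClasses) > 2):
--
--         entriesToProcess = list(itertools.product(listofClasses, listofClasses))
--
--         # now examine each entry and check that we have no duplicates
--
--         for entry in range(len(entriesToProcess)):
--             if not ((entriesToProcess[entry][0] == entriesToProcess[entry][1])):
--                 firstClass = entriesToProcess[entry][0]
--                 secondClass = entriesToProcess[entry][1]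
--
--                 combinedModel = firstClass[0] + secondClass[0]
--                 otherModel = secondClass[0] + firstClass[0]
--
--                 if not ((combinedModel in processDict) or (otherModel in processDict)):
--                     processDict[combinedModel] = modelNumber
--                     modelNumber += 1
--
--     elif (len(listofClasses) == 2):
--
--         firstClass = listofClasses[0]
--         secondClass = listofClasses[1]
--
--         combinedModel = firstClass[0] + secondClass[0]
--         otherModel = secondClass[0] + firstClass[0]
--
--         if not ((combinedModel in processDict) or (otherModel in processDict)):
--             processDict[combinedModel] = modelNumber
--
--     return processDict
-- ===== SOURCE B (Python) =====
-- def GenerateListOfPairsToTest(listofClasses):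
--     import itertools
--
--     processDict = {}
--     modelNumber = 0
--
--     for firstClass, secondClass in itertools.combinations(listofClasses, 2):
--         if firstClass != secondClass:
--             combinedModel = firstClass[0] + secondClass[0]
--             otherModel = secondClass[0] + firstClass[0]
--             if combinedModel not in processDict and otherModel not in processDict:
--                 processDict[combinedModel] = modelNumber
--                 modelNumber += 1
--
--     return processDict
-- ===== Notes on version B (the rewrite author's own statement) =====
-- stated objective: simpler
-- what changed: B iterates itertools.combinations(listofClasses, 2) lazily in one uniform loop instead of materialising all n^2 ordered pairs with itertools.product, filtering self-pairs and symmetric duplicates, and keeping a separate special-cased len==2 branch; combinations yields about half as many pairs and no n^2 intermediate list.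
-- intended difference: On two-element lists whose two entries are equal, A's special len==2 branch has no equality guard and returns {c+c: 0} for first character c, while B skips the equal pair (as A itself does for len>2) and returns {}; B's uniform behaviour is the intended one. — e.g. on GenerateListOfPairsToTest(["ab", "ab"]): A returns [("aa", 0)], B returns []
import Mathlib
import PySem

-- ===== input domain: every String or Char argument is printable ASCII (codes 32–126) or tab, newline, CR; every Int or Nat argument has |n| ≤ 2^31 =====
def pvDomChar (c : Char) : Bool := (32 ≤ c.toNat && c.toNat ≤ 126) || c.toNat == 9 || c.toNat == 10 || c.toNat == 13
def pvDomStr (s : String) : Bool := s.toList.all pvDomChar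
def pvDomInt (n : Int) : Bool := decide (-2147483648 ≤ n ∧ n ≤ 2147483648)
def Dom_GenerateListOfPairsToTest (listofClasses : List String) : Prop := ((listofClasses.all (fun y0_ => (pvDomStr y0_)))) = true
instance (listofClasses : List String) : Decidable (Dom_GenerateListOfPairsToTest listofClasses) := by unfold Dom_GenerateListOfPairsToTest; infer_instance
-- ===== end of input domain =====

-- B replaces A's product-over-all-ordered-pairs plus self-pair filter plus separate len==2 branch
-- by one uniform loop over the unordered pairs (itertools.combinations), for simplicity.

-- ===== PORT A =====
def GenerateListOfPairsToTest (listofClasses : List String) : List (String × Int) :=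
  let processDict : PySem.Dict String Int := PySem.Dict.empty
  let modelNumber : Int := 0
  if listofClasses.length > 2 then
    -- itertools.product(listofClasses, listofClasses)
    let entriesToProcess := listofClasses.flatMap (fun a => listofClasses.map (fun b => (a, b)))
    -- 'for entry in range(len(entriesToProcess))' with entriesToProcess[entry]
    -- = a left-to-right pass over entriesToProcess
    let st := entriesToProcess.foldl (fun (st : PySem.Dict String Int × Int) e =>
      if ¬ (e.1 = e.2) then
        let firstClass := e.1
        let secondClass := e.2
        -- s[0]: exact on the admitted inputs (Pre_ excludes the IndexError cases)
        let combinedModel := String.mk [(PySem.Str.pyGet? firstClass 0).getD ' ',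
                                        (PySem.Str.pyGet? secondClass 0).getD ' ']
        let otherModel := String.mk [(PySem.Str.pyGet? secondClass 0).getD ' ',
                                     (PySem.Str.pyGet? firstClass 0).getD ' ']
        if ¬ (st.1.contains combinedModel || st.1.contains otherModel) then
          (st.1.insert combinedModel st.2, st.2 + 1)
        else st
      else st) (processDict, modelNumber)
    st.1.items
  else if listofClasses.length = 2 then
    let firstClass := listofClasses.getD 0 ""
    let secondClass := listofClasses.getD 1 ""
    let combinedModel := String.mk [(PySem.Str.pyGet? firstClass 0).getD ' ',
                                    (PySem.Str.pyGet? secondClass 0).getD ' ']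
    let otherModel := String.mk [(PySem.Str.pyGet? secondClass 0).getD ' ',
                                 (PySem.Str.pyGet? firstClass 0).getD ' ']
    if ¬ (processDict.contains combinedModel || processDict.contains otherModel) then
      (processDict.insert combinedModel modelNumber).items
    else processDict.items
  else
    processDict.items

-- ===== PORT B =====
def GenerateListOfPairsToTest_alt (listofClasses : List String) : List (String × Int) :=
  -- 'for firstClass, secondClass in itertools.combinations(listofClasses, 2)'
  ((PySem.List.combinations listofClasses 2).foldl
    (fun (st : PySem.Dict String Int × Int) c =>
      match c with
      | [firstClass, secondClass] =>
        if firstClass ≠ secondClass then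
          let combinedModel := String.mk [(PySem.Str.pyGet? firstClass 0).getD ' ',
                                          (PySem.Str.pyGet? secondClass 0).getD ' ']
          let otherModel := String.mk [(PySem.Str.pyGet? secondClass 0).getD ' ',
                                       (PySem.Str.pyGet? firstClass 0).getD ' ']
          if !st.1.contains combinedModel && !st.1.contains otherModel then
            (st.1.insert combinedModel st.2, st.2 + 1)
          else st
        else st
      | _ => st)
    (PySem.Dict.empty, 0)).1.items

-- ===== PRECONDITION & SPEC =====
-- Pre_ excludes exactly the inputs on which the Python A raises IndexError by indexing an
-- empty string: a two-element list containing "", or a longer list containing "" together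
-- with some other value (A reaches firstClass[0] on an unequal pair there).
def Pre_GenerateListOfPairsToTest (listofClasses : List String) : Prop :=
  listofClasses.length ≤ 1 ∨ "" ∉ listofClasses ∨
    (2 < listofClasses.length ∧ ∀ s ∈ listofClasses, s = "")
instance (listofClasses : List String) : Decidable (Pre_GenerateListOfPairsToTest listofClasses) := by
  unfold Pre_GenerateListOfPairsToTest; infer_instance

def pvWitness_GenerateListOfPairsToTest : List String := ["ab", "cd", "ef"]

-- On two-element lists whose two entries are equal, A's special len==2 branch has no equality
-- guard and returns {c+c: 0} (c the first character), while B skips the equal pair — exactly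
-- as A itself does for len>2 — and returns {}; B's uniform behaviour is the intended one.
def D_GenerateListOfPairsToTest (listofClasses : List String) : Prop :=
  listofClasses.length = 2 ∧ listofClasses.getD 0 "" = listofClasses.getD 1 ""
instance (listofClasses : List String) : Decidable (D_GenerateListOfPairsToTest listofClasses) := by
  unfold D_GenerateListOfPairsToTest; infer_instance

def Spec_GenerateListOfPairsToTest (listofClasses : List String) (out : List (String × Int)) : Prop :=
  ¬ D_GenerateListOfPairsToTest listofClasses → out = GenerateListOfPairsToTest_alt listofClasses
instance (listofClasses : List String) (out : List (String × Int)) : Decidable (Spec_GenerateListOfPairsToTest listofClasses out) := by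
  unfold Spec_GenerateListOfPairsToTest; infer_instance

def pvDiffWitness_GenerateListOfPairsToTest : List String := ["ab", "ab"]
def pvDiffWitnessOut_GenerateListOfPairsToTest : (List (String × Int)) × (List (String × Int)) :=
  ([("aa", 0)], [])

-- ===== CLAIM (what is proved, stated in full; the proofs are below) =====
def Claim_unchanged_GenerateListOfPairsToTest : Prop := ∀ (listofClasses : List String), Dom_GenerateListOfPairsToTest listofClasses → Pre_GenerateListOfPairsToTest listofClasses → Spec_GenerateListOfPairsToTest listofClasses (GenerateListOfPairsToTest listofClasses)
def Claim_changed_GenerateListOfPairsToTest : Prop := Dom_GenerateListOfPairsToTest (pvDiffWitness_GenerateListOfPairsToTest) ∧ Pre_GenerateListOfPairsToTest (pvDiffWitness_GenerateListOfPairsToTest) ∧ D_GenerateListOfPairsToTest (pvDiffWitness_GenerateListOfPairsToTest) ∧ GenerateListOfPairsToTest (pvDiffWitness_GenerateListOfPairsToTest) = pvDiffWitnessOut_GenerateListOfPairsToTest.1 ∧ GenerateListOfPairsToTest_alt (pvDiffWitness_GenerateListOfPairsToTest) = pvDiffWitnessOut_GenerateListOfPairsToTest.2 ∧ pvDiffWitnessOut_GenerateListOfPairsToTest.1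 ≠ pvDiffWitnessOut_GenerateListOfPairsToTest.2
def Claim_exact_GenerateListOfPairsToTest : Prop := ∀ (listofClasses : List String), Dom_GenerateListOfPairsToTest listofClasses → Pre_GenerateListOfPairsToTest listofClasses → D_GenerateListOfPairsToTest listofClasses → GenerateListOfPairsToTest listofClasses ≠ GenerateListOfPairsToTest_alt listofClasses

-- ===== LEMMAS AND PROOFS =====

-- the common step: process one ordered pair (a, b) against the (dict, counter) state
def pvKey (a b : String) : String :=
  String.mk [(PySem.Str.pyGet? a 0).getD ' ', (PySem.Str.pyGet? b 0).getD ' ']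

def pvStep (st : PySem.Dict String Int × Int) (a b : String) : PySem.Dict String Int × Int :=
  if a = b then st
  else if st.1.contains (pvKey a b) || st.1.contains (pvKey b a) then st
  else (st.1.insert (pvKey a b) st.2, st.2 + 1)

-- the unordered-pair loop both programs compute
def pvComb (st : PySem.Dict String Int × Int) : List String → PySem.Dict String Int × Int
  | [] => st
  | a :: r => pvComb (r.foldl (fun s b => pvStep s a b) st) r

theorem pvStepA_eq (st : PySem.Dict String Int × Int) (e : String × String) :
    (if ¬ (e.1 = e.2) then
      (if ¬ (st.1.contains (pvKey e.1 e.2) || st.1.contains (pvKey e.2 e.1)) then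
        (st.1.insert (pvKey e.1 e.2) st.2, st.2 + 1)
      else st)
    else st) = pvStep st e.1 e.2 := by
  unfold pvStep
  by_cases h : e.1 = e.2
  · simp [h]
  · simp only [h, not_false_eq_true, if_true]
    by_cases hc : st.1.contains (pvKey e.1 e.2) || st.1.contains (pvKey e.2 e.1) <;>
      simp [hc]

def pvHandled (d : PySem.Dict String Int) (a b : String) : Prop :=
  d.contains (pvKey a b) = true ∨ d.contains (pvKey b a) = true

theorem pvHandled_symm {d : PySem.Dict String Int} {a b : String}
    (h : pvHandled d a b) : pvHandled d b a := h.symm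

theorem pvStep_contains {st : PySem.Dict String Int × Int} {k : String} (a b : String)
    (h : st.1.contains k = true) : (pvStep st a b).1.contains k = true := by
  unfold pvStep
  split_ifs with h1 h2 <;> simp [PySem.Dict.contains_insert, h]

theorem pvFold_contains {k : String} (m : List String) (a : String)
    (st : PySem.Dict String Int × Int) (h : st.1.contains k = true) :
    ((m.foldl (fun s b => pvStep s a b) st).1.contains k = true) := by
  induction m generalizing st with
  | nil => exact h
  | cons b r ih => exact ih _ (pvStep_contains a b h)

theorem pvFold_handled {d : PySem.Dict String Int × Int} {x y : String} (m : List String)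
    (a : String) (h : pvHandled d.1 x y) :
    pvHandled ((m.foldl (fun s b => pvStep s a b) d).1) x y := by
  rcases h with h | h
  · exact Or.inl (pvFold_contains m a d h)
  · exact Or.inr (pvFold_contains m a d h)

theorem pvStep_noop {st : PySem.Dict String Int × Int} {a b : String}
    (h : a = b ∨ pvHandled st.1 a b) : pvStep st a b = st := by
  unfold pvStep
  rcases h with h | h
  · simp [h]
  · rcases h with h | h <;> simp [h]

theorem pvStep_handles (st : PySem.Dict String Int × Int) (a b : String) (hne : a ≠ b) :
    pvHandled (pvStep st a b).1 a b := by
  unfold pvStep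
  simp only [if_neg hne]
  by_cases hc : st.1.contains (pvKey a b) || st.1.contains (pvKey b a)
  · simp only [if_pos hc]
    rcases Bool.or_eq_true_iff.mp hc with h | h
    · exact Or.inl h
    · exact Or.inr h
  · simp only [if_neg hc]
    exact Or.inl (by simp)

theorem pvFold_handles (m : List String) (a : String)
    (st : PySem.Dict String Int × Int) :
    ∀ b ∈ m, a ≠ b → pvHandled ((m.foldl (fun s b => pvStep s a b) st).1) a b := by
  induction m generalizing st with
  | nil => intro b hb; cases hb
  | cons c r ih =>
    intro b hb hne
    rcases List.mem_cons.mp hb with rfl | hb'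
    · exact pvFold_handled r a (pvStep_handles st a b hne)
    · exact ih _ b hb' hne

theorem pvFold_noop {m : List String} {a : String}
    {st : PySem.Dict String Int × Int}
    (h : ∀ b ∈ m, a = b ∨ pvHandled st.1 a b) :
    m.foldl (fun s b => pvStep s a b) st = st := by
  induction m with
  | nil => rfl
  | cons c r ih =>
    simp only [List.foldl_cons, pvStep_noop (h c (by simp))]
    exact ih (fun b hb => h b (by simp [hb]))

-- A's product pass equals the unordered-pair loop, given that every pair with a member in the
-- already-processed prefix p is already handled (or equal)
theorem pvProduct_eq_comb (q p : List String) (st : PySem.Dict String Int × Int)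
    (hInv : ∀ x ∈ p, ∀ b ∈ p ++ q, x ≠ b → pvHandled st.1 x b) :
    q.foldl (fun s a => (p ++ q).foldl (fun s' b => pvStep s' a b) s) st = pvComb st q := by
  induction q generalizing p st with
  | nil => rfl
  | cons a r ih =>
    simp only [List.foldl_cons, pvComb]
    have hrow : (p ++ a :: r).foldl (fun s' b => pvStep s' a b) st
        = (a :: r).foldl (fun s' b => pvStep s' a b) st := by
      rw [List.foldl_append]
      congr 1
      refine pvFold_noop (fun b hb => ?_)
      by_cases hab : a = b
      · exact Or.inl hab
      · exact Or.inr (pvHandled_symm (hInv b hb a (by simp) (Ne.symm hab)))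
    have hself : (a :: r).foldl (fun s' b => pvStep s' a b) st
        = r.foldl (fun s' b => pvStep s' a b) st := by
      simp only [List.foldl_cons, pvStep_noop (Or.inl rfl)]
    set st' := r.foldl (fun s' b => pvStep s' a b) st with hst'
    have hmain : r.foldl (fun s x => (p ++ a :: r).foldl (fun s' b => pvStep s' x b) s) st'
        = pvComb st' r := by
      have hsplit : p ++ a :: r = (p ++ [a]) ++ r := by simp
      rw [hsplit]
      refine ih (p ++ [a]) st' ?_
      intro x hx b hb hne
      rcases List.mem_append.mp hx with hx | hx
      · -- x in the old prefix: handled before the row, persists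
        refine pvFold_handled r a (hInv x hx b (by simpa using hb) hne)
      · -- x = a : b in p is handled by symmetry of the invariant; b in r was handled in the row
        simp only [List.mem_singleton] at hx
        subst hx
        have hb' : b ∈ p ∨ b = x ∨ b ∈ r := by
          simpa [List.mem_append] using hb
        rcases hb' with hb | hb | hb
        · exact pvFold_handled r x (pvHandled_symm (hInv b hb x (by simp) (Ne.symm hne)))
        · exact absurd hb.symm hne
        · exact pvFold_handles r x st b hb hne
    rw [hrow, hself]
    exact hmain

theorem pvStepB_eq (st : PySem.Dict String Int × Int) (a b : String) :
    (if a ≠ b then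
      (if !st.1.contains (pvKey a b) && !st.1.contains (pvKey b a) then
        (st.1.insert (pvKey a b) st.2, st.2 + 1)
      else st)
    else st) = pvStep st a b := by
  unfold pvStep
  by_cases h : a = b
  · simp [h]
  · simp only [ne_eq, h, not_false_eq_true, if_true]
    by_cases hc : (st.1.contains (pvKey a b) || st.1.contains (pvKey b a)) = true
    · rw [if_pos hc]
      have hfalse : (!st.1.contains (pvKey a b) && !st.1.contains (pvKey b a)) = false := by
        rcases Bool.or_eq_true_iff.mp hc with h1 | h1 <;> simp [h1]
      rw [hfalse]
      simp
    · rw [if_neg hc]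
      simp only [Bool.or_eq_true, not_or, Bool.not_eq_true] at hc
      simp [hc.1, hc.2]

-- B's combinations fold equals the unordered-pair loop
theorem pvAltFold_eq_comb (l : List String) (st : PySem.Dict String Int × Int) :
    (PySem.List.combinations l 2).foldl
      (fun st c =>
        match c with
        | [firstClass, secondClass] =>
          if firstClass ≠ secondClass then
            let combinedModel := String.mk [(PySem.Str.pyGet? firstClass 0).getD ' ',
                                            (PySem.Str.pyGet? secondClass 0).getD ' ']
            let otherModel := String.mk [(PySem.Str.pyGet? secondClass 0).getD ' ',
                                         (PySem.Str.pyGet? firstClass 0).getD ' ']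
            if !st.1.contains combinedModel && !st.1.contains otherModel then
              (st.1.insert combinedModel st.2, st.2 + 1)
            else st
          else st
        | _ => st) st = pvComb st l := by
  induction l generalizing st with
  | nil => simp [PySem.List.combinations_nil_succ, pvComb]
  | cons a r ih =>
    rw [show (2 : Nat) = 1 + 1 from rfl, PySem.List.combinations_cons_succ,
      PySem.List.combinations_one]
    rw [List.foldl_append, List.map_map, List.foldl_map]
    simp only [Function.comp]
    rw [ih]
    rw [show pvComb st (a :: r) = pvComb (r.foldl (fun s b => pvStep s a b) st) r from rfl]
    exact congrArg (fun s => pvComb s r)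
      (List.foldl_ext _ _ st (fun acc b _ => pvStepB_eq acc a b))

theorem pvA_big (l : List String) (h : l.length > 2) :
    GenerateListOfPairsToTest l = (pvComb (PySem.Dict.empty, 0) l).1.items := by
  unfold GenerateListOfPairsToTest
  rw [if_pos h]
  simp only [List.foldl_flatMap]
  have hrows : ∀ (st : PySem.Dict String Int × Int),
      l.foldl (fun acc a => (l.map (fun b => (a, b))).foldl
        (fun st (e : String × String) =>
          if ¬ (e.1 = e.2) then
            (if ¬ (st.1.contains (pvKey e.1 e.2) || st.1.contains (pvKey e.2 e.1)) then
              (st.1.insert (pvKey e.1 e.2) st.2, st.2 + 1)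
            else st)
          else st) acc) st
      = l.foldl (fun s a => l.foldl (fun s' b => pvStep s' a b) s) st := by
    intro st
    refine List.foldl_ext _ _ st (fun acc a _ => ?_)
    rw [List.foldl_map]
    refine List.foldl_ext _ _ acc (fun acc' b _ => ?_)
    exact pvStepA_eq acc' (a, b)
  simp only [pvKey] at hrows
  rw [hrows]
  have := pvProduct_eq_comb l [] (PySem.Dict.empty, 0) (by simp)
  simp only [List.nil_append] at this
  rw [this]

theorem pvAlt_eq_comb (l : List String) :
    GenerateListOfPairsToTest_alt l = (pvComb (PySem.Dict.empty, 0) l).1.items := by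
  unfold GenerateListOfPairsToTest_alt
  rw [pvAltFold_eq_comb]

theorem GenerateListOfPairsToTest_spec : Claim_unchanged_GenerateListOfPairsToTest := by
  intro l _ _
  unfold Spec_GenerateListOfPairsToTest
  intro hD
  match l with
  | [] => rfl
  | [a] =>
    simp [GenerateListOfPairsToTest, GenerateListOfPairsToTest_alt,
      PySem.List.combinations_cons_succ, PySem.List.combinations_nil_succ,
      PySem.List.combinations_one]
  | [a, b] =>
    have hab : a ≠ b := by
      intro hab
      exact hD ⟨rfl, by simp [hab]⟩
    rw [pvAlt_eq_comb]
    simp only [pvComb, List.foldl_cons, List.foldl_nil]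
    have hstep : pvStep (PySem.Dict.empty, 0) a b
        = ((PySem.Dict.empty : PySem.Dict String Int).insert (pvKey a b) 0, 1) := by
      simp [pvStep, hab]
    rw [hstep]
    simp [GenerateListOfPairsToTest, pvKey, PySem.Dict.contains_empty]
  | a :: b :: c :: r =>
    rw [pvA_big _ (by simp), pvAlt_eq_comb]

theorem GenerateListOfPairsToTest_changed : Claim_changed_GenerateListOfPairsToTest := by
  unfold Claim_changed_GenerateListOfPairsToTest; decide

theorem GenerateListOfPairsToTest_tight : Claim_exact_GenerateListOfPairsToTest := by
  intro l _ _ hD heq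
  obtain ⟨hlen, hgd⟩ := hD
  match l, hlen with
  | [a, b], _ =>
    have hab : a = b := by simpa using hgd
    subst hab
    rw [pvAlt_eq_comb] at heq
    simp only [pvComb, List.foldl_cons, List.foldl_nil,
      pvStep_noop (Or.inl rfl)] at heq
    simp [GenerateListOfPairsToTest, PySem.Dict.items_insert,
      PySem.Dict.contains_empty] at heq
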